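-- pv_equiv track=rewrite | github.com/ikradnegyhusz/Data-Science-Demos | PascalTriangle/pascal.py | search_pascal_multiples_fast
-- ===== SOURCE A (Python) =====
-- from collections import Counter
-- from math import ceil
--
-- def search_pascal_multiples_fast(row_limit):
--     if row_limit<5: #exclude the first 4 rows because there are no values to check
--         return []
--     else:
--         #initialize first row that matters
--         pascal_row=[1,4,6,4,1]
--         inner_values=[6] #inner values are the numbers in each row excluding the first and last 2 numbers
--         #generate each row and extract the inner values of each row
--         #(start at row 6)
--         for n in range(6, row_limit):
--             half_length = ceil((n-2) / 2)
--             #only looping through half of the rows because they are symmetrical (the even ones)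
--             half =  [pascal_row[i] + pascal_row[i + 1] for i in range(half_length)]
--             if n % 2 == 0:
--                 pascal_row[1:n] = half + half[::-1]
--             else:
--                 pascal_row[1:n] = half + half[:-1][::-1]
--
--             inner_values.extend(pascal_row[2:n-2])
--
--         #count how many times each element appears
--         value_counts = Counter(inner_values)
--
--         #return the numbers that had appeared more than 3 times
--         return sorted([k for k, v in value_counts.items() if v > 3])
-- ===== SOURCE B (Python) =====
-- from collections import Counter
--
-- def search_pascal_multiples_fast(row_limit):
--     if row_limit < 5:
--         return []
--     counts = Counter()
--     for r in range(4, row_limit - 1):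
--         c = r * (r - 1) // 2                 # comb(r, 2)
--         for k in range(2, r - 1):
--             counts[c] += 1
--             c = c * (r - k) // (k + 1)       # comb(r, k+1) from comb(r, k)
--     return sorted(v for v, c in counts.items() if c > 3)
-- ===== Notes on version B (the rewrite author's own statement) =====
-- stated objective: simpler
-- what changed: Replaces the mutable half-row additive Pascal construction (symmetric halves, ceil-length slices, slice assignment, then Counter of an accumulated list) by a direct per-row enumeration of the inner binomials with the multiplicative recurrence comb(r,k+1)=comb(r,k)*(r-k)//(k+1), counted straight into a Counter.
import Mathlib
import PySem

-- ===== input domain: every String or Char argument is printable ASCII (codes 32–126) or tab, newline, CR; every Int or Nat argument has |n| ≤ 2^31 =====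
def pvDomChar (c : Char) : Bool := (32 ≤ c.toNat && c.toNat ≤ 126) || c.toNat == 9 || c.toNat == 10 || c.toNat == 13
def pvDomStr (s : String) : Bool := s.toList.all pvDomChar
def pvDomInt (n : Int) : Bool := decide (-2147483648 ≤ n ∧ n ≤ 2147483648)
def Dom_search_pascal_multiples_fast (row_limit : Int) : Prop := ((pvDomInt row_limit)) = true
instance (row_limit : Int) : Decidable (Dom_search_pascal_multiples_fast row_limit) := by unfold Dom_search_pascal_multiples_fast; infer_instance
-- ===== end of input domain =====

-- B replaces A's mutable half-row additive Pascal construction by a direct per-row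
-- enumeration of the inner binomials via the multiplicative recurrence
-- comb(r,k+1) = comb(r,k)*(r-k)//(k+1); objective: simpler. Both are total.

-- ===== PORT A =====
-- one loop iteration of A (`for n in range(6, row_limit)`); the indexing pascal_row[i]
-- is always in range in A, so pyGetD _ _ 0 is exact; ceil((n-2)/2) on a Python float is
-- exact for |n| ≤ 2^31 and equals -((-(n-2))//2); `half[::-1]` is List.reverse
-- (PySem.List.slice?_none_none_neg_one); the slice assignment pascal_row[1:n] = mid is
-- pascal_row[:1] ++ mid ++ pascal_row[n:].
def pvStepA (st : List Int × List Int) (n : Int) : List Int × List Int :=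
  let pascal_row := st.1
  let half_length : Int := -(PySem.Int.floordiv (-(n - 2)) 2)
  let half := (PySem.List.pyRange 0 half_length 1).map
      (fun i => PySem.List.pyGetD pascal_row i 0 + PySem.List.pyGetD pascal_row (i + 1) 0)
  let mid := if PySem.Int.mod n 2 == 0 then half ++ half.reverse
             else half ++ (PySem.List.slice half none (some (-1))).reverse
  let pascal_row' := PySem.List.slice pascal_row none (some 1) ++ mid ++
      PySem.List.slice pascal_row (some n) none
  (pascal_row', st.2 ++ PySem.List.slice pascal_row' (some 2) (some (n - 2)))

def search_pascal_multiples_fast (row_limit : Int) : List Int :=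
  if row_limit < 5 then []
  else
    let st := (PySem.List.pyRange 6 row_limit 1).foldl pvStepA ([1, 4, 6, 4, 1], [6])
    let value_counts := PySem.Dict.counter st.2
    PySem.List.sorted ((value_counts.items.filter (fun p => decide (3 < p.2))).map (·.1))
      (fun x => x) false

-- ===== PORT B =====
-- Counter() is Dict.empty; counts[c] += 1 is modify c 0 (+1); '//' is PySem.Int.floordiv
def search_pascal_multiples_fast_alt (row_limit : Int) : List Int :=
  if row_limit < 5 then []
  else
    let counts := (PySem.List.pyRange 4 (row_limit - 1) 1).foldl
      (fun counts r =>
        ((PySem.List.pyRange 2 (r - 1) 1).foldl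
          (fun (st : PySem.Dict Int Int × Int) k =>
            (st.1.modify st.2 0 (· + 1), PySem.Int.floordiv (st.2 * (r - k)) (k + 1)))
          (counts, PySem.Int.floordiv (r * (r - 1)) 2)).1)
      PySem.Dict.empty
    PySem.List.sorted ((counts.items.filter (fun p => decide (3 < p.2))).map (·.1))
      (fun x => x) false

-- ===== PRECONDITION & SPEC =====
def Spec_search_pascal_multiples_fast (row_limit : Int) (out : List Int) : Prop := out = search_pascal_multiples_fast_alt row_limit
instance (row_limit : Int) (out : List Int) : Decidable (Spec_search_pascal_multiples_fast row_limit out) := by unfold Spec_search_pascal_multiples_fast; infer_instance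

-- ===== CLAIM (what is proved, stated in full; the proofs are below) =====
def Claim_equal_search_pascal_multiples_fast : Prop := ∀ (row_limit : Int), Dom_search_pascal_multiples_fast row_limit → Spec_search_pascal_multiples_fast row_limit (search_pascal_multiples_fast row_limit)

-- ===== LEMMAS AND PROOFS =====

-- the inner entries of row r of Pascal's triangle (proof-side description of both programs)
def pvInner (r : Int) : List Int :=
  (PySem.List.pyRange 2 (r - 1) 1).map (fun k => (Nat.choose r.toNat k.toNat : Int))

def pvRow (r : Nat) : List Int := (List.range r).map (fun k => (Nat.choose r k : Int))

lemma pvRow_getD (r i : Nat) (h : i < r) : (pvRow r).getD i 0 = (r.choose i : Int) := by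
  simp [pvRow, List.getD_eq_getElem?_getD, h]

lemma pvHalf_eq (m : Nat) (hm : 7 ≤ m) :
    (PySem.List.pyRange 0 (((m - 1) / 2 : Nat) : Int) 1).map
      (fun i => PySem.List.pyGetD (pvRow (m - 2)) i 0 + PySem.List.pyGetD (pvRow (m - 2)) (i + 1) 0)
    = (List.range ((m - 1) / 2)).map (fun i => ((m - 1).choose (i + 1) : Int)) := by
  rw [PySem.List.pyRange_zero_nat, List.map_map]
  apply List.map_congr_left
  intro i hi
  simp only [List.mem_range] at hi
  have hb : i + 1 < m - 2 := by
    have h1 : (m - 1) % 2 < 2 := Nat.mod_lt _ (by omega)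
    have h2 := Nat.div_add_mod (m - 1) 2
    omega
  have hcast : ((i : Int) + 1) = ((i + 1 : Nat) : Int) := by push_cast; ring
  simp only [Function.comp, hcast, PySem.List.pyGetD_natCast]
  rw [pvRow_getD _ _ (by omega), pvRow_getD _ _ hb]
  rw [show m - 1 = m - 2 + 1 by omega, Nat.choose_succ_succ]
  push_cast
  ring

-- mid assembly
lemma pvMid_eq (m : Nat) (hm : 7 ≤ m) :
    (if PySem.Int.mod (m : Int) 2 == 0
      then ((List.range ((m - 1) / 2)).map (fun i => ((m - 1).choose (i + 1) : Int))) ++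
           ((List.range ((m - 1) / 2)).map (fun i => ((m - 1).choose (i + 1) : Int))).reverse
      else ((List.range ((m - 1) / 2)).map (fun i => ((m - 1).choose (i + 1) : Int))) ++
           (PySem.List.slice ((List.range ((m - 1) / 2)).map (fun i => ((m - 1).choose (i + 1) : Int))) none (some (-1))).reverse)
    = (List.range (m - 2)).map (fun j => ((m - 1).choose (j + 1) : Int)) := by
  set h := (m - 1) / 2 with hh
  have hmod : (m - 1) % 2 < 2 := Nat.mod_lt _ (by omega)
  have hdm := Nat.div_add_mod (m - 1) 2
  have hle : h + 1 ≤ m - 2 := by omega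
  have hmodm : PySem.Int.mod (m : Int) 2 = ((m % 2 : Nat) : Int) := PySem.Int.mod_natCast m 2
  rw [PySem.List.slice_to_neg_one]
  by_cases hpar : m % 2 = 0
  · have : (PySem.Int.mod (m : Int) 2 == 0) = true := by rw [hmodm, hpar]; decide
    rw [this, if_pos rfl]
    have h2 : 2 * h = m - 2 := by omega
    apply List.ext_getElem
    · simp; omega
    · intro i hi1 hi2
      simp only [List.length_append, List.length_map, List.length_range, List.length_reverse] at hi1
      by_cases hlt : i < h
      · rw [List.getElem_append_left (by simpa using hlt)]
        simp
      · rw [List.getElem_append_right (by simpa using hlt)]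
        simp only [List.length_map, List.length_range]
        rw [List.getElem_reverse]
        simp only [List.getElem_map, List.getElem_range, List.length_map, List.length_range]
        rw [show h - 1 - (i - h) + 1 = (m - 1) - (i + 1) by omega, Nat.choose_symm (by omega)]
  · have : (PySem.Int.mod (m : Int) 2 == 0) = false := by
      rw [hmodm, show m % 2 = 1 by omega]; decide
    rw [this, if_neg (by simp)]
    have h2 : 2 * h - 1 = m - 2 := by omega
    apply List.ext_getElem
    · simp; omega
    · intro i hi1 hi2
      simp only [List.length_append, List.length_map, List.length_range, List.length_reverse,
        List.length_dropLast] at hi1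
      by_cases hlt : i < h
      · rw [List.getElem_append_left (by simpa using hlt)]
        simp
      · rw [List.getElem_append_right (by simpa using hlt)]
        simp only [List.length_map, List.length_range]
        rw [List.getElem_reverse]
        simp only [List.length_dropLast, List.length_map, List.length_range]
        rw [List.getElem_dropLast]
        simp only [List.getElem_map, List.getElem_range]
        rw [show h - 1 - 1 - (i - h) + 1 = (m - 1) - (i + 1) by omega, Nat.choose_symm (by omega)]

lemma pvInner_nat (r : Nat) (hr : 4 ≤ r) :
    pvInner (r : Nat) = (List.range (r - 3)).map (fun j => (Nat.choose r (j + 2) : Int)) := by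
  unfold pvInner
  rw [PySem.List.pyRange_one, List.map_map]
  rw [show ((r : Int) - 1 - 2).toNat = r - 3 by omega]
  apply List.map_congr_left
  intro j hj
  have h4 : ((2 : Int) + j).toNat = j + 2 := by omega
  simp [Function.comp, h4]

lemma pvHalfLen (m : Nat) (hm : 7 ≤ m) :
    -(PySem.Int.floordiv (-((m : Int) - 2)) 2) = (((m - 1) / 2 : Nat) : Int) := by
  rw [PySem.Int.neg_floordiv_neg_eq_iff_of_pos (by omega)]
  have h2 : (m - 1) % 2 < 2 := Nat.mod_lt _ (by omega)
  have h3 := Nat.div_add_mod (m - 1) 2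
  constructor <;> push_cast <;> omega

lemma pvRow_succ (r : Nat) :
    pvRow (r + 1) = 1 :: (List.range r).map (fun j => ((r + 1).choose (j + 1) : Int)) := by
  simp [pvRow, List.range_succ_eq_map, List.map_map, Function.comp]

lemma pvStepA_eq (m : Nat) (hm : 7 ≤ m) (acc : List Int) :
    pvStepA (pvRow (m - 2), acc) (m : Int) = (pvRow (m - 1), acc ++ pvInner ((m : Int) - 1)) := by
  have hrow : PySem.List.slice (pvRow (m - 2)) none (some 1) ++
      ((List.range (m - 2)).map (fun j => ((m - 1).choose (j + 1) : Int))) ++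
      PySem.List.slice (pvRow (m - 2)) (some (m : Int)) none = pvRow (m - 1) := by
    rw [show (some (1 : Int)) = some ((1 : Nat) : Int) by norm_num, PySem.List.slice_to_natCast,
        show ((m : Int)) = ((m : Nat) : Int) by norm_num, PySem.List.slice_from_natCast]
    rw [List.drop_eq_nil_of_le (by simp [pvRow])]
    rw [show m - 1 = (m - 2) + 1 by omega, pvRow_succ]
    rw [show (m - 2) + 1 = m - 1 by omega]
    rw [show (pvRow (m - 2)).take 1 = [1] by
      rw [show m - 2 = (m - 3) + 1 by omega, pvRow_succ]; rfl]
    simp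
  have hinner : PySem.List.slice (pvRow (m - 1)) (some 2) (some ((m : Int) - 2)) =
      pvInner ((m : Int) - 1) := by
    rw [show ((m : Int) - 1) = ((m - 1 : Nat) : Int) by omega, pvInner_nat _ (by omega),
        show (some (2 : Int)) = some ((2 : Nat) : Int) by norm_num,
        show (some ((m : Int) - 2)) = some (((m - 2 : Nat) : Int)) by congr 1; omega,
        PySem.List.slice_natCast]
    apply List.ext_getElem
    · simp [pvRow]; omega
    · intro i hi1 hi2
      simp only [List.getElem_take, List.getElem_drop, pvRow, List.getElem_map, List.getElem_range]
      rw [show 2 + i = i + 2 by omega]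
  show (_, _) = _
  rw [pvHalfLen m hm, pvHalf_eq m hm, pvMid_eq m hm, hrow, hinner]

lemma pvFold_eq (m : Nat) (hm : 7 ≤ m) :
    (PySem.List.pyRange 6 (m : Int) 1).foldl pvStepA ([1, 4, 6, 4, 1], [6]) =
      (pvRow (m - 2), (PySem.List.pyRange 4 ((m : Int) - 1) 1).flatMap pvInner) := by
  induction m, hm using Nat.le_induction with
  | base => decide
  | succ m hm ih =>
    have h1 : ((m + 1 : Nat) : Int) = (m : Int) + 1 := by push_cast; ring
    rw [h1, PySem.List.pyRange_one_succ_right (by omega), List.foldl_append]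
    simp only [List.foldl_cons, List.foldl_nil]
    rw [ih, pvStepA_eq m hm]
    rw [show (m : Int) + 1 - 1 = ((m : Int) - 1) + 1 by ring,
        PySem.List.pyRange_one_succ_right (by omega), List.flatMap_append]
    rw [show m + 1 - 2 = m - 1 by omega]
    simp

-- inner multiplicative loop invariant
lemma pvInnerLoop (ρ : Nat) (hρ : 4 ≤ ρ) (n : Nat) (j : Nat) (hj : n + j = ρ - 3)
    (d : PySem.Dict Int Int) :
    ((PySem.List.pyRange (2 + (j : Int)) ((ρ : Int) - 1) 1).foldl
        (fun (st : PySem.Dict Int Int × Int) k =>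
          (st.1.modify st.2 0 (· + 1), PySem.Int.floordiv (st.2 * ((ρ : Int) - k)) (k + 1)))
        (d, (Nat.choose ρ (j + 2) : Int))).1
      = ((List.range n).map (fun i => (Nat.choose ρ (i + j + 2) : Int))).foldl
          (fun d x => d.modify x 0 (· + 1)) d := by
  induction n generalizing j d with
  | zero =>
    rw [PySem.List.pyRange_one_eq_nil (by omega)]
    simp
  | succ n ih =>
    rw [PySem.List.pyRange_one_cons (by omega)]
    simp only [List.foldl_cons]
    have hdiv : PySem.Int.floordiv ((Nat.choose ρ (j + 2) : Int) * ((ρ : Int) - (2 + j)) )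
        ((2 + (j : Int)) + 1) = (Nat.choose ρ (j + 3) : Int) := by
      have hch := Nat.choose_succ_right_eq ρ (j + 2)
      -- ρ.choose (j+3) * (j+3) = ρ.choose (j+2) * (ρ - (j+2))
      have hcast : (Nat.choose ρ (j + 2) : Int) * ((ρ : Int) - (2 + j)) =
          ((Nat.choose ρ (j + 3) * (j + 3) : Nat) : Int) := by
        rw [show j + 3 = j + 2 + 1 by ring, hch]
        push_cast [Nat.cast_sub (by omega : j + 2 ≤ ρ)]
        ring
      rw [hcast, show ((2 + (j : Int)) + 1) = ((j + 3 : Nat) : Int) by push_cast; ring,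
          PySem.Int.floordiv_natCast]
      rw [Nat.mul_div_cancel _ (by omega)]
    rw [hdiv]
    rw [show (2 + (j : Int)) + 1 = 2 + ((j + 1 : Nat) : Int) by push_cast; ring]
    rw [show j + 3 = (j + 1) + 2 by omega]
    rw [ih (j + 1) (by omega)]
    rw [List.range_succ_eq_map, List.map_cons, List.foldl_cons, List.map_map]
    congr 1
    · norm_num
    · apply List.map_congr_left
      intro i hi
      simp only [Function.comp, Nat.succ_eq_add_one]
      rw [show i + (j + 1) + 2 = i + 1 + j + 2 by ring]

lemma pvAltRow (r : Int) (hr : 4 ≤ r) (d : PySem.Dict Int Int) :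
    ((PySem.List.pyRange 2 (r - 1) 1).foldl
        (fun (st : PySem.Dict Int Int × Int) k =>
          (st.1.modify st.2 0 (· + 1), PySem.Int.floordiv (st.2 * (r - k)) (k + 1)))
        (d, PySem.Int.floordiv (r * (r - 1)) 2)).1
      = (pvInner r).foldl (fun d x => d.modify x 0 (· + 1)) d := by
  obtain ⟨ρ, rfl⟩ : ∃ ρ : Nat, r = (ρ : Int) := ⟨r.toNat, by omega⟩
  have hρ : 4 ≤ ρ := by omega
  have hc0 : PySem.Int.floordiv ((ρ : Int) * ((ρ : Int) - 1)) 2 = (Nat.choose ρ 2 : Int) := by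
    rw [show (ρ : Int) * ((ρ : Int) - 1) = ((ρ * (ρ - 1) : Nat) : Int) by
          push_cast [Nat.cast_sub (by omega : 1 ≤ ρ)]; ring,
        show (2 : Int) = ((2 : Nat) : Int) by norm_num, PySem.Int.floordiv_natCast,
        Nat.choose_two_right]
  rw [hc0]
  have h0 := pvInnerLoop ρ hρ (ρ - 3) 0 (by omega) d
  rw [show (2 : Int) + ((0 : Nat) : Int) = 2 by norm_num, show (0 : Nat) + 2 = 2 by norm_num] at h0
  rw [h0, pvInner_nat ρ hρ]

lemma pvAltFold (rs : List Int) (h : ∀ r ∈ rs, 4 ≤ r) (d : PySem.Dict Int Int) :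
    rs.foldl (fun counts r =>
        ((PySem.List.pyRange 2 (r - 1) 1).foldl
          (fun (st : PySem.Dict Int Int × Int) k =>
            (st.1.modify st.2 0 (· + 1), PySem.Int.floordiv (st.2 * (r - k)) (k + 1)))
          (counts, PySem.Int.floordiv (r * (r - 1)) 2)).1) d
      = (rs.flatMap pvInner).foldl (fun d x => d.modify x 0 (· + 1)) d := by
  induction rs generalizing d with
  | nil => simp
  | cons r rs ih =>
    rw [List.foldl_cons, List.flatMap_cons, List.foldl_append]
    rw [pvAltRow r (h r (by simp)) d]
    exact ih (fun x hx => h x (by simp [hx])) _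

-- ===== VERDICT (by name: the statement is the Claim_ definition above) =====
theorem search_pascal_multiples_fast_spec : Claim_equal_search_pascal_multiples_fast := by
  intro rl _
  unfold Spec_search_pascal_multiples_fast search_pascal_multiples_fast search_pascal_multiples_fast_alt
  by_cases h5 : rl < 5
  · simp [h5]
  · rw [if_neg h5, if_neg h5]
    by_cases h7 : rl < 7
    · interval_cases rl <;> decide
    · have hm : rl = ((rl.toNat : Nat) : Int) := by omega
      rw [hm, pvFold_eq rl.toNat (by omega),
          pvAltFold _ (fun r hr => ((PySem.List.mem_pyRange_one).1 hr).1) PySem.Dict.empty,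
          ← PySem.Dict.counter_eq_foldl]
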